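-- pv_equiv track=rewrite | github.com/DexterFinegan/Poop-Statistics | Poop_Extractor.py | order_dictionary
-- ===== SOURCE A (Python) =====
-- def order_dictionary(dic):
--     # INPUT
--     # dic       : Dictionary with keys, and numbers for values
--
--     ordered_list = sorted(list(dic.values()), reverse=True)
--     ordered_dict = {}
--     for value in ordered_list:
--         keys = [key for key, val in dic.items() if val == value]
--         count = 0
--         if keys[count] not in ordered_dict.keys():
--             ordered_dict[keys[count]] = int(value)
--         else:
--             count += 1
--     return ordered_dict
-- ===== SOURCE B (Python) =====
-- def order_dictionary(dic):
--     # One pass recording the first key seen for each distinct value,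
--     # then sort the distinct values once, descending.
--     first = {}
--     for key, val in dic.items():
--         if val not in first:
--             first[val] = key
--     return {key: int(val) for val, key in sorted(first.items(), key=lambda item: item[0], reverse=True)}
-- ===== Notes on version B (the rewrite author's own statement) =====
-- stated objective: faster
-- what changed: A rescans the whole dict once per value in a descending sort of all values (duplicates included); B makes one pass recording the first key per distinct value and then sorts the distinct values once. Pre_ excludes association lists with duplicate keys, which never represent a Python dict (the two ports' readings of such a list diverge).
import Mathlib
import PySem

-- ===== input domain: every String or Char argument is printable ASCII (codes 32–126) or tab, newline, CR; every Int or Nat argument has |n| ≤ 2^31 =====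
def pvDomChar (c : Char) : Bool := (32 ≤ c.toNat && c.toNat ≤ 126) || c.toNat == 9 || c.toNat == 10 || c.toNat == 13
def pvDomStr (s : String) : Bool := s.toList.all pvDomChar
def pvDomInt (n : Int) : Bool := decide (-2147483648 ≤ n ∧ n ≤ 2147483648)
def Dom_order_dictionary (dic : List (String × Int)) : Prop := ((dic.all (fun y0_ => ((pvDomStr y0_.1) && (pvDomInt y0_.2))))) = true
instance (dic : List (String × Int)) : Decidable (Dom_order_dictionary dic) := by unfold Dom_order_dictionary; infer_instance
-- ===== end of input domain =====

-- B records the first key per distinct value in one pass and sorts the distinct values once,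
-- instead of A's rescan of the whole dict for every element of a descending sort of all values.

-- ===== PORT A =====
def order_dictionary (dic : List (String × Int)) : List (String × Int) :=
  let ordered_list := PySem.List.sorted (dic.map Prod.snd) (fun v => v) true
  (ordered_list.foldl (fun (od : PySem.Dict String Int) value =>
      let keys := (dic.filter (fun p => p.2 == value)).map Prod.fst
      match PySem.List.pyGet? keys 0 with
      | none => od   -- keys[0]: unreachable (value is drawn from dic's values, so keys is nonempty)
      | some k => if od.contains k then od else od.insert k value)
    PySem.Dict.empty).items

-- ===== PORT B =====
def order_dictionary_alt (dic : List (String × Int)) : List (String × Int) :=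
  let first : PySem.Dict Int String :=
    dic.foldl (fun f kv => if f.contains kv.2 then f else f.insert kv.2 kv.1) PySem.Dict.empty
  (PySem.List.sorted first.items (fun it => it.1) true).map (fun it => (it.2, it.1))

-- ===== PRECONDITION & SPEC =====
-- Pre_ excludes association lists with duplicate keys: such a list never represents a Python
-- dict (whose keys are unique), and the two ports' first-match readings of it diverge.
def Pre_order_dictionary (dic : List (String × Int)) : Prop := (dic.map Prod.fst).Nodup
instance (dic : List (String × Int)) : Decidable (Pre_order_dictionary dic) := by unfold Pre_order_dictionary; infer_instance
def pvWitness_order_dictionary : (List (String × Int)) := [("a", 2), ("b", 1), ("c", 2)]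
def Spec_order_dictionary (dic : List (String × Int)) (out : List (String × Int)) : Prop := out = order_dictionary_alt dic
instance (dic : List (String × Int)) (out : List (String × Int)) : Decidable (Spec_order_dictionary dic out) := by unfold Spec_order_dictionary; infer_instance

-- ===== CLAIM (what is proved, stated in full; the proofs are below) =====
def Claim_equal_order_dictionary : Prop := ∀ (dic : List (String × Int)), Dom_order_dictionary dic → Pre_order_dictionary dic → Spec_order_dictionary dic (order_dictionary dic)

-- ===== LEMMAS AND PROOFS =====

def pvFk (dic : List (String × Int)) (v : Int) : String :=
  (((dic.filter (fun p => p.2 == v)).map Prod.fst)).headD ""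

lemma pv_fk_mem (dic : List (String × Int)) (v : Int) (hv : v ∈ dic.map Prod.snd) :
    (pvFk dic v, v) ∈ dic := by
  obtain ⟨p, hp, hpv⟩ := List.mem_map.mp hv
  have hpf : p ∈ dic.filter (fun q => q.2 == v) := List.mem_filter.mpr ⟨hp, by simp [hpv]⟩
  cases hfl : dic.filter (fun q => q.2 == v) with
  | nil => rw [hfl] at hpf; simp at hpf
  | cons a t =>
    have ha : a ∈ dic.filter (fun q => q.2 == v) := by rw [hfl]; exact List.mem_cons_self
    obtain ⟨ha1, ha2⟩ := List.mem_filter.mp ha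
    have h2 : a.2 = v := by simpa using ha2
    have h1 : pvFk dic v = a.1 := by simp [pvFk, hfl]
    rw [h1, ← h2]
    exact ha1

lemma pv_pyGet_fk (dic : List (String × Int)) (v : Int) (hv : v ∈ dic.map Prod.snd) :
    PySem.List.pyGet? ((dic.filter (fun p => p.2 == v)).map Prod.fst) 0 = some (pvFk dic v) := by
  obtain ⟨p, hp, hpv⟩ := List.mem_map.mp hv
  have hpf : p ∈ dic.filter (fun q => q.2 == v) := List.mem_filter.mpr ⟨hp, by simp [hpv]⟩
  cases hfl : dic.filter (fun q => q.2 == v) with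
  | nil => rw [hfl] at hpf; simp at hpf
  | cons a t => simp [hfl, pvFk, PySem.List.pyGet?, PySem.List.pyIdx?]

lemma pv_keys_nodup_val_eq {l : List (String × Int)} (hn : (l.map Prod.fst).Nodup)
    {k : String} {v w : Int} (hv : (k, v) ∈ l) (hw : (k, w) ∈ l) : v = w := by
  induction l with
  | nil => simp at hv
  | cons a t ih =>
    simp only [List.map_cons, List.nodup_cons] at hn
    rcases List.mem_cons.mp hv with h1 | h1 <;> rcases List.mem_cons.mp hw with h2 | h2
    · have := congrArg Prod.snd (h1.trans h2.symm)
      simpa using this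
    · exfalso; exact hn.1 (by rw [← h1] at *; exact List.mem_map.mpr ⟨(k, w), h2, rfl⟩)
    · exfalso; exact hn.1 (by rw [← h2] at *; exact List.mem_map.mpr ⟨(k, v), h1, rfl⟩)
    · exact ih hn.2 h1 h2

lemma pv_fk_inj (dic : List (String × Int)) (hn : (dic.map Prod.fst).Nodup)
    (v w : Int) (hv : v ∈ dic.map Prod.snd) (hw : w ∈ dic.map Prod.snd)
    (h : pvFk dic v = pvFk dic w) : v = w := by
  have h1 := pv_fk_mem dic v hv
  have h2 := pv_fk_mem dic w hw
  rw [h] at h1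
  exact pv_keys_nodup_val_eq hn h1 h2

def pvMkA (dic : List (String × Int)) (s : List Int) : PySem.Dict String Int :=
  PySem.Dict.mk (s.map (fun v => (pvFk dic v, v)))

lemma pv_containsA (dic : List (String × Int)) (hn : (dic.map Prod.fst).Nodup)
    (s : List Int) (hs : ∀ u ∈ s, u ∈ dic.map Prod.snd) (v : Int) (hv : v ∈ dic.map Prod.snd) :
    (pvMkA dic s).contains (pvFk dic v) = decide (v ∈ s) := by
  simp only [pvMkA, PySem.Dict.contains_mk, List.any_map]
  by_cases hvs : v ∈ s
  · simp only [hvs, decide_true]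
    exact List.any_eq_true.mpr ⟨v, hvs, by simp⟩
  · simp only [hvs, decide_false]
    refine List.any_eq_false.mpr ?_
    intro u hu
    simp only [Function.comp]
    intro hcon
    exact hvs ((pv_fk_inj dic hn u v (hs u hu) hv (by simpa using hcon)) ▸ hu)

lemma pv_foldA (dic : List (String × Int)) (hn : (dic.map Prod.fst).Nodup)
    (l s : List Int) (hl : ∀ v ∈ l, v ∈ dic.map Prod.snd) (hs : ∀ v ∈ s, v ∈ dic.map Prod.snd) :
    l.foldl (fun (od : PySem.Dict String Int) value =>
      let keys := (dic.filter (fun p => p.2 == value)).map Prod.fst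
      match PySem.List.pyGet? keys 0 with
      | none => od
      | some k => if od.contains k then od else od.insert k value) (pvMkA dic s)
    = pvMkA dic (PySem.Set.update s l) := by
  induction l generalizing s with
  | nil => simp [PySem.Set.update]
  | cons v t ih =>
    have hv : v ∈ dic.map Prod.snd := hl v List.mem_cons_self
    have hstep : PySem.Set.update s (v :: t) = PySem.Set.update (PySem.Set.add s v) t := by
      simp [PySem.Set.update]
    rw [hstep]
    simp only [List.foldl_cons, pv_pyGet_fk dic v hv]
    rw [pv_containsA dic hn s hs v hv]
    by_cases hvs : v ∈ s
    · have hadd : PySem.Set.add s v = s := by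
        simp [PySem.Set.add, PySem.Set.contains, hvs]
      simp only [hvs, decide_true, if_true, hadd]
      exact ih s (fun u hu => hl u (List.mem_cons_of_mem _ hu)) hs
    · have hadd : PySem.Set.add s v = s ++ [v] := by
        simp [PySem.Set.add, PySem.Set.contains, hvs]
      have hcf : (pvMkA dic s).contains (pvFk dic v) = false := by
        rw [pv_containsA dic hn s hs v hv]; simp [hvs]
      have hins : (pvMkA dic s).insert (pvFk dic v) v = pvMkA dic (s ++ [v]) := by
        apply PySem.Dict.ext
        rw [PySem.Dict.items_insert_of_not_contains _ _ hcf]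
        simp [pvMkA]
      simp only [hvs, decide_false, hins, hadd]
      exact ih (s ++ [v]) (fun u hu => hl u (List.mem_cons_of_mem _ hu))
        (fun u hu => by rcases List.mem_append.mp hu with h | h
                        · exact hs u h
                        · simp at h; exact h ▸ hv)

def pvMkB (dic : List (String × Int)) (s : List Int) : PySem.Dict Int String :=
  PySem.Dict.mk (s.map (fun v => (v, pvFk dic v)))

lemma pv_ofList_append_singleton {α : Type} [BEq α] (xs : List α) (x : α) :
    PySem.Set.ofList (xs ++ [x]) = PySem.Set.add (PySem.Set.ofList xs) x := by
  simp [PySem.Set.ofList]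

lemma pv_foldB (dic pre suf : List (String × Int)) (h : dic = pre ++ suf) :
    suf.foldl (fun (f : PySem.Dict Int String) kv =>
        if f.contains kv.2 then f else f.insert kv.2 kv.1)
      (pvMkB dic (PySem.Set.ofList (pre.map Prod.snd)))
    = pvMkB dic (PySem.Set.ofList ((pre ++ suf).map Prod.snd)) := by
  induction suf generalizing pre with
  | nil => simp
  | cons kv t ih =>
    have hS : ∀ u, u ∈ PySem.Set.ofList (pre.map Prod.snd) ↔ u ∈ pre.map Prod.snd :=
      fun u => PySem.Set.mem_ofList _ u
    have hc : (pvMkB dic (PySem.Set.ofList (pre.map Prod.snd))).contains kv.2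
        = decide (kv.2 ∈ pre.map Prod.snd) := by
      simp only [pvMkB, PySem.Dict.contains_mk, List.any_map]
      by_cases hm : kv.2 ∈ pre.map Prod.snd
      · simp only [hm, decide_true]
        exact List.any_eq_true.mpr ⟨kv.2, (hS kv.2).mpr hm, by simp⟩
      · simp only [hm, decide_false]
        refine List.any_eq_false.mpr ?_
        intro u hu
        simp only [Function.comp]
        intro hcon
        exact hm ((by simpa using hcon : u = kv.2) ▸ (hS u).mp hu)
    simp only [List.foldl_cons]
    rw [hc]
    by_cases hm : kv.2 ∈ pre.map Prod.snd
    · have hadd : PySem.Set.ofList ((pre ++ [kv]).map Prod.snd) = PySem.Set.ofList (pre.map Prod.snd) := by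
        simp only [List.map_append, List.map_cons, List.map_nil, pv_ofList_append_singleton]
        simp [PySem.Set.add, PySem.Set.contains, hm]
      have := ih (pre ++ [kv]) (by simpa using h)
      rw [hadd] at this
      rw [if_pos (by simp [hm])]
      rw [this]
      simp
    · -- kv is the first pair in dic with value kv.2, so B records exactly A's key for it
      have hfk : pvFk dic kv.2 = kv.1 := by
        have hfil : dic.filter (fun p => p.2 == kv.2) = kv :: t.filter (fun p => p.2 == kv.2) := by
          rw [h, List.filter_append]
          have : pre.filter (fun p => p.2 == kv.2) = [] := by
            rw [List.filter_eq_nil_iff]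
            intro p hp hcon
            exact hm (List.mem_map.mpr ⟨p, hp, by simpa using hcon⟩)
          simp [this]
        simp [pvFk, hfil]
      have hcf : (pvMkB dic (PySem.Set.ofList (pre.map Prod.snd))).contains kv.2 = false := by
        rw [hc]; simp [hm]
      have hnotc : List.contains (PySem.Set.ofList (pre.map Prod.snd)) kv.2 = false := by
        simp only [List.contains_eq_any_beq]
        refine List.any_eq_false.mpr ?_
        intro u hu hcon
        exact hm (((by simpa using hcon : kv.2 = u).symm) ▸ (hS u).mp hu)
      have hins : (pvMkB dic (PySem.Set.ofList (pre.map Prod.snd))).insert kv.2 kv.1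
          = pvMkB dic (PySem.Set.ofList ((pre ++ [kv]).map Prod.snd)) := by
        apply PySem.Dict.ext
        rw [PySem.Dict.items_insert_of_not_contains _ _ hcf]
        simp only [List.map_append, List.map_cons, List.map_nil, pv_ofList_append_singleton]
        rw [PySem.Set.add, PySem.Set.contains, hnotc]
        simp [pvMkB, hfk]
      rw [if_neg (by simp [hm]), hins]
      have := ih (pre ++ [kv]) (by simpa using h)
      rw [this]
      simp

lemma pv_foldl_add_sublist {α : Type} [BEq α] (xs s : List α) :
    ∃ t, List.foldl PySem.Set.add s xs = s ++ t ∧ t.Sublist xs := by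
  induction xs generalizing s with
  | nil => exact ⟨[], by simp⟩
  | cons x r ih =>
    simp only [List.foldl_cons]
    by_cases hx : PySem.Set.contains s x = true
    · have : PySem.Set.add s x = s := by rw [PySem.Set.add, if_pos hx]
      rw [this]
      obtain ⟨t, h1, h2⟩ := ih s
      exact ⟨t, h1, h2.cons x⟩
    · have : PySem.Set.add s x = s ++ [x] := by
        simp only [PySem.Set.add]
        rw [if_neg (by simpa using hx)]
      rw [this]
      obtain ⟨t, h1, h2⟩ := ih (s ++ [x])
      exact ⟨x :: t, by simpa using h1, h2.cons₂ x⟩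

lemma pv_ofList_sublist {α : Type} [BEq α] (xs : List α) : (PySem.Set.ofList xs).Sublist xs := by
  obtain ⟨t, h1, h2⟩ := pv_foldl_add_sublist xs PySem.Set.empty
  simpa [PySem.Set.ofList, PySem.Set.empty] using h1 ▸ h2

lemma pv_final (dic : List (String × Int)) (hpre : (dic.map Prod.fst).Nodup) :
    order_dictionary dic = order_dictionary_alt dic := by
  have hempty : (PySem.Dict.empty : PySem.Dict String Int) = pvMkA dic [] := by
    apply PySem.Dict.ext; simp [pvMkA, PySem.Dict.empty]
  have hemptyB : (PySem.Dict.empty : PySem.Dict Int String) = pvMkB dic (PySem.Set.ofList (([] : List (String × Int)).map Prod.snd)) := by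
    apply PySem.Dict.ext; simp [pvMkB, PySem.Dict.empty, PySem.Set.ofList]
  have hA : order_dictionary dic
      = ((PySem.Set.ofList (PySem.List.sorted (dic.map Prod.snd) (fun v => v) true)).map
          (fun v => (pvFk dic v, v))) := by
    show (List.foldl (fun (od : PySem.Dict String Int) value =>
      let keys := (dic.filter (fun p => p.2 == value)).map Prod.fst
      match PySem.List.pyGet? keys 0 with
      | none => od
      | some k => if od.contains k then od else od.insert k value)
      PySem.Dict.empty (PySem.List.sorted (dic.map Prod.snd) (fun v => v) true)).items = _
    rw [hempty]
    rw [pv_foldA dic hpre _ []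
      (fun v hv => (PySem.List.mem_sorted _ _ _ _).mp hv)
      (by intro v hv; simp at hv)]
    simp [pvMkA, PySem.Set.update, PySem.Set.ofList]
  have hB : order_dictionary_alt dic
      = (PySem.List.sorted ((PySem.Set.ofList (dic.map Prod.snd)).map (fun v => (v, pvFk dic v)))
          (fun it => it.1) true).map (fun it => (it.2, it.1)) := by
    show (PySem.List.sorted (dic.foldl (fun (f : PySem.Dict Int String) kv =>
        if f.contains kv.2 then f else f.insert kv.2 kv.1) PySem.Dict.empty).items
      (fun it => it.1) true).map (fun it => (it.2, it.1)) = _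
    rw [hemptyB, pv_foldB dic [] dic rfl]
    simp [pvMkB]
  have hp : (PySem.Set.ofList (PySem.List.sorted (dic.map Prod.snd) (fun v => v) true)).Perm
      (PySem.Set.ofList (dic.map Prod.snd)) := by
    apply List.perm_of_nodup_nodup_toFinset_eq (PySem.Set.nodup_ofList _) (PySem.Set.nodup_ofList _)
    ext a
    simp [List.mem_toFinset, PySem.Set.mem_ofList, PySem.List.mem_sorted]
  have hpair : (PySem.Set.ofList (PySem.List.sorted (dic.map Prod.snd) (fun v => v) true)).Pairwise
      (fun v w => w < v) := by
    have h1 : (PySem.Set.ofList (PySem.List.sorted (dic.map Prod.snd) (fun v => v) true)).Pairwise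
        (fun v w => w ≤ v) :=
      (PySem.List.sorted_pairwise_rev (dic.map Prod.snd) (fun v => v)).sublist
        (pv_ofList_sublist _)
    have h2 := PySem.Set.nodup_ofList (PySem.List.sorted (dic.map Prod.snd) (fun v => v) true)
    exact (h1.and h2).imp (fun h => lt_of_le_of_ne h.1 (Ne.symm h.2))
  have hsorted : PySem.List.sorted
      ((PySem.Set.ofList (dic.map Prod.snd)).map (fun v => (v, pvFk dic v)))
      (fun it => it.1) true
      = (PySem.Set.ofList (PySem.List.sorted (dic.map Prod.snd) (fun v => v) true)).map
          (fun v => (v, pvFk dic v)) := by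
    apply PySem.List.sorted_rev_eq_of_perm_of_pairwise_gt
    · exact hp.map _
    · rw [List.pairwise_map]
      exact hpair
  rw [hA, hB, hsorted, List.map_map]
  simp [Function.comp]

-- ===== VERDICT (by name: the statement is the Claim_ definition above) =====
theorem order_dictionary_spec : Claim_equal_order_dictionary := by
  intro dic _ hpre
  unfold Pre_order_dictionary at hpre
  unfold Spec_order_dictionary
  exact pv_final dic hpre
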